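-- pv_equiv track=rewrite | github.com/barcern/cfg-python | project/barbora_cfg_project.py | create_breed_list
-- ===== SOURCE A (Python) =====
-- def create_breed_list(data, dict_key, user_input_list):
--     """Append suitable breeds to a list."""
--     breed_list = []
--     # If the user selects 'any', do not refine the list
--     if 'any' in user_input_list:
--         breed_list = data
--     else:
--         for user_input in user_input_list:
--             for breed in data:
--                 try:
--                     breed[dict_key]
--                 except KeyError:
--                     pass
--                 else:
--                     # If the characteristic is available for the breed and
--                     # the breed is not already on the list,
--                     # add the breed to the list
--                     if (breed[dict_key].find(user_input) != -1
--                         and breed not in breed_list):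
--                         breed_list.append(breed)
--     return breed_list
-- ===== SOURCE B (Python) =====
-- def create_breed_list(data, dict_key, user_input_list):
--     """Append suitable breeds to a list."""
--     # If the user selects 'any', do not refine the list
--     if 'any' in user_input_list:
--         return data
--     # One pass over data: drop each breed into the bucket of the FIRST
--     # search term it matches (A's dedup makes the first term win).
--     buckets = [[] for _ in user_input_list]
--     for breed in data:
--         try:
--             val = breed[dict_key]
--         except KeyError:
--             continue
--         for i, user_input in enumerate(user_input_list):
--             if val.find(user_input) != -1:
--                 buckets[i].append(breed)
--                 break
--     # Flatten the buckets, keeping only the first occurrence of equal breeds.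
--     breed_list = []
--     for bucket in buckets:
--         for breed in bucket:
--             if breed not in breed_list:
--                 breed_list.append(breed)
--     return breed_list
-- ===== Notes on version B (the rewrite author's own statement) =====
-- stated objective: faster
-- what changed: A makes one full pass over data per search term, running a substring test for every (term, breed) pair and a dedup membership scan inside the double loop; B makes a single pass over data, dropping each breed into the bucket of the first search term it matches (stopping the term scan there), then flattens the buckets with one final dedup pass.
import Mathlib
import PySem

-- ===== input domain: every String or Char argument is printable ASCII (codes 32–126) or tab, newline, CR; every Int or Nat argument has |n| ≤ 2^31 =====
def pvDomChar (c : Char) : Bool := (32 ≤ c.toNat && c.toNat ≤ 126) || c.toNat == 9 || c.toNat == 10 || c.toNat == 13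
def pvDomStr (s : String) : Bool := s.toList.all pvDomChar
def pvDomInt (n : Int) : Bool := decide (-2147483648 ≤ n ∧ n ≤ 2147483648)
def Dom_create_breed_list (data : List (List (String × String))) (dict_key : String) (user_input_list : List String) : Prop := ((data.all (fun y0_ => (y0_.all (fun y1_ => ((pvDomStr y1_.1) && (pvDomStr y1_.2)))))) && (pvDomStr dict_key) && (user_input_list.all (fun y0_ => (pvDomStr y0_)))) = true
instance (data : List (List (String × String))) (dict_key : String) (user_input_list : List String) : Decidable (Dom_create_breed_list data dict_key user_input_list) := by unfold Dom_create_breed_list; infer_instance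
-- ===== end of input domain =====

-- B groups each breed under the FIRST matching search term in one pass over the data
-- (buckets + one final dedup pass) instead of A's pass over the data per search term;
-- objective: faster single-pass decomposition (measured), identical return value.

-- ===== PORT A =====
-- breed[dict_key]: the Python dict a Lean association list denotes has the FIRST binding
-- of a key winning; PySem.Dict.mk gives exactly that first-match lookup.
def pyDictGet (breed : List (String × String)) (k : String) : Option String :=
  (PySem.Dict.mk breed).get? k

-- Python's `==` on dicts (used by `breed not in breed_list`): same key set, same values
-- (order-insensitive), on the dicts the association lists denote (first binding wins).
def pyDictEq (d1 d2 : List (String × String)) : Bool :=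
  d1.all (fun kv => pyDictGet d2 kv.1 == pyDictGet d1 kv.1) &&
  d2.all (fun kv => pyDictGet d1 kv.1 == pyDictGet d2 kv.1)

def create_breed_list (data : List (List (String × String))) (dict_key : String) (user_input_list : List String) : List (List (String × String)) :=
  if user_input_list.contains "any" then data
  else
    user_input_list.foldl (fun breed_list user_input =>
      data.foldl (fun breed_list breed =>
        match pyDictGet breed dict_key with
        | none => breed_list                       -- except KeyError: pass
        | some v =>
          if (PySem.Str.find v user_input != -1) &&
             !(breed_list.any (fun b => pyDictEq b breed)) then
            breed_list ++ [breed]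
          else breed_list) breed_list) []

-- ===== PORT B =====
-- for i, user_input in enumerate(...): if val.find(...) != -1: ...; break
-- = index of the first matching search term (none if no term matches).
def firstIdx (v : String) : List String → Option Nat
  | [] => none
  | ui :: rest =>
    if PySem.Str.find v ui != -1 then some 0
    else (firstIdx v rest).map (· + 1)

-- buckets[i].append(x)
def appendAt {α : Type} : List (List α) → Nat → α → List (List α)
  | [], _, _ => []
  | l :: ls, 0, x => (l ++ [x]) :: ls
  | l :: ls, i + 1, x => l :: appendAt ls i x

def create_breed_list_alt (data : List (List (String × String))) (dict_key : String) (user_input_list : List String) : List (List (String × String)) :=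
  if user_input_list.contains "any" then data
  else
    (data.foldl (fun buckets breed =>
      match pyDictGet breed dict_key with
      | none => buckets                            -- except KeyError: continue
      | some v =>
        match firstIdx v user_input_list with
        | none => buckets
        | some i => appendAt buckets i breed)
      (user_input_list.map (fun _ => ([] : List (List (String × String)))))).foldl
      (fun breed_list bucket =>
      bucket.foldl (fun breed_list breed =>
        if breed_list.any (fun b => pyDictEq b breed) then breed_list
        else breed_list ++ [breed]) breed_list) []

-- ===== PRECONDITION & SPEC =====
def Spec_create_breed_list (data : List (List (String × String))) (dict_key : String) (user_input_list : List String) (out : List (List (String × String))) : Prop := out = create_breed_list_alt data dict_key user_input_list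
instance (data : List (List (String × String))) (dict_key : String) (user_input_list : List String) (out : List (List (String × String))) : Decidable (Spec_create_breed_list data dict_key user_input_list out) := by unfold Spec_create_breed_list; infer_instance

-- ===== CLAIM (what is proved, stated in full; the proofs are below) =====
def Claim_equal_create_breed_list : Prop := ∀ (data : List (List (String × String))) (dict_key : String) (user_input_list : List String), Dom_create_breed_list data dict_key user_input_list → Spec_create_breed_list data dict_key user_input_list (create_breed_list data dict_key user_input_list)

-- ===== LEMMAS AND PROOFS =====

def fmatch (dict_key : String) (uil : List String) (b : List (String × String)) : Option Nat :=
  (pyDictGet b dict_key).bind (fun v => firstIdx v uil)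

def dstep (acc : List (List (String × String))) (b : List (String × String)) : List (List (String × String)) :=
  if acc.any (fun x => pyDictEq x b) then acc else acc ++ [b]

def dedupFrom (acc : List (List (String × String))) (l : List (List (String × String))) : List (List (String × String)) :=
  l.foldl dstep acc

def memD (acc : List (List (String × String))) (b : List (String × String)) : Bool :=
  acc.any (fun x => pyDictEq x b)

theorem firstIdx_lt (v : String) (uil : List String) (i : Nat) (h : firstIdx v uil = some i) :
    i < uil.length := by
  induction uil generalizing i with
  | nil => simp [firstIdx] at h
  | cons ui rest ih =>
    simp only [firstIdx] at h
    split at h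
    · cases h; simp
    · rcases Option.map_eq_some_iff.mp h with ⟨j, hj, rfl⟩
      have := ih j hj; simp; omega

theorem firstIdx_append (v : String) (pre suf : List String) :
    firstIdx v (pre ++ suf) =
      match firstIdx v pre with
      | some j => some j
      | none => (firstIdx v suf).map (· + pre.length) := by
  induction pre with
  | nil => cases h : firstIdx v suf <;> simp [firstIdx, h]
  | cons u pre ih =>
    simp only [List.cons_append, firstIdx]
    split
    · rfl
    · rw [ih]
      cases firstIdx v pre <;> cases firstIdx v suf <;> simp <;> omega

-- if the first matching index is exactly pre.length, the term AT that index matches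
theorem firstIdx_self (v : String) (pre rest : List String) (ui : String)
    (h : firstIdx v (pre ++ ui :: rest) = some pre.length) :
    (PySem.Str.find v ui != -1) = true := by
  rw [firstIdx_append] at h
  cases h1 : firstIdx v pre with
  | some j =>
    have := firstIdx_lt v pre j h1
    rw [h1] at h; simp at h; omega
  | none =>
    rw [h1] at h
    simp only [firstIdx] at h
    split at h
    · assumption
    · rcases Option.map_eq_some_iff.mp h with ⟨a, ha, hh⟩
      rcases Option.map_eq_some_iff.mp ha with ⟨c, _, rfl⟩
      omega

-- if the term at index pre.length matches, the first matching index is ≤ pre.length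
theorem firstIdx_le (v : String) (pre rest : List String) (ui : String)
    (h : (PySem.Str.find v ui != -1) = true) :
    ∃ j, firstIdx v (pre ++ ui :: rest) = some j ∧ j ≤ pre.length := by
  rw [firstIdx_append]
  cases h1 : firstIdx v pre with
  | some j => exact ⟨j, rfl, Nat.le_of_lt (firstIdx_lt v pre j h1)⟩
  | none =>
    refine ⟨pre.length, ?_, le_refl _⟩
    simp only [firstIdx, if_pos h]
    simp

theorem pyDictEq_refl (b : List (String × String)) : pyDictEq b b = true := by
  simp [pyDictEq]

theorem memD_mono (acc : List (List (String × String))) (t : List (List (String × String)))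
    (b : List (String × String)) (h : memD acc b = true) : memD (acc ++ t) b = true := by
  simp [memD] at h ⊢; exact Or.inl h

theorem memD_dstep (acc : List (List (String × String))) (x b : List (String × String))
    (h : memD acc b = true) : memD (dstep acc x) b = true := by
  unfold dstep; split
  · exact h
  · exact memD_mono acc [x] b h

theorem memD_dedupFrom (acc : List (List (String × String))) (l : List (List (String × String)))
    (b : List (String × String)) (h : memD acc b = true) : memD (dedupFrom acc l) b = true := by
  induction l generalizing acc with
  | nil => exact h
  | cons x l ih => exact ih (dstep acc x) (memD_dstep acc x b h)

theorem memD_dedupFrom_of_mem (acc : List (List (String × String))) (l : List (List (String × String)))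
    (b : List (String × String)) (h : b ∈ l) : memD (dedupFrom acc l) b = true := by
  induction l generalizing acc with
  | nil => simp at h
  | cons x l ih =>
    have hstep : dedupFrom acc (x :: l) = dedupFrom (dstep acc x) l := rfl
    rw [hstep]
    rcases List.mem_cons.mp h with rfl | h
    · apply memD_dedupFrom
      unfold dstep; split
      · assumption
      · simp [memD, pyDictEq_refl]
    · exact ih (dstep acc x) h

theorem appendAt_map_range {α : Type} (n : Nat) (i : Nat) (g : Nat → List α) (x : α) (h : i < n) :
    appendAt ((List.range n).map g) i x
      = (List.range n).map (fun j => if j = i then g j ++ [x] else g j) := by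
  induction n generalizing i g with
  | zero => omega
  | succ n ih =>
    rw [List.range_succ_eq_map]
    simp only [List.map_cons, List.map_map]
    cases i with
    | zero => simp [appendAt, Function.comp]
    | succ i =>
      simp only [appendAt, Function.comp_def]
      rw [ih i (fun j => g (j + 1)) (by omega)]
      rw [if_neg (by omega : ¬(0 = i + 1))]
      refine congrArg (List.cons (g 0)) ?_
      apply List.map_congr_left
      intro j _
      by_cases hj : j = i <;> simp [hj]

-- the bucket-building fold of B computes, for every index, the sublist of l whose
-- first matching term is that index
theorem buckets_eq (dict_key : String) (uil : List String) (l : List (List (String × String)))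
    (g : Nat → List (List (String × String))) :
    l.foldl (fun buckets breed =>
        match pyDictGet breed dict_key with
        | none => buckets
        | some v =>
          match firstIdx v uil with
          | none => buckets
          | some i => appendAt buckets i breed) ((List.range uil.length).map g)
      = (List.range uil.length).map
          (fun i => g i ++ l.filter (fun b => fmatch dict_key uil b == some i)) := by
  induction l generalizing g with
  | nil => simp
  | cons b l ih =>
    simp only [List.foldl_cons]
    cases hk : pyDictGet b dict_key with
    | none =>
      have hfm : fmatch dict_key uil b = none := by simp [fmatch, hk]
      simp only [hk]
      rw [ih g]
      apply List.map_congr_left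
      intro i _
      rw [List.filter_cons_of_neg (by simp [hfm])]
    | some v =>
      cases hf : firstIdx v uil with
      | none =>
        have hfm : fmatch dict_key uil b = none := by simp [fmatch, hk, hf]
        simp only [hk, hf]
        rw [ih g]
        apply List.map_congr_left
        intro i _
        rw [List.filter_cons_of_neg (by simp [hfm])]
      | some i0 =>
        have hfm : fmatch dict_key uil b = some i0 := by simp [fmatch, hk, hf]
        have hi0 := firstIdx_lt v uil i0 hf
        simp only [hk, hf]
        rw [appendAt_map_range uil.length i0 g b hi0]
        rw [ih (fun j => if j = i0 then g j ++ [b] else g j)]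
        apply List.map_congr_left
        intro i _
        by_cases hii : i = i0
        · subst hii
          rw [if_pos rfl, List.filter_cons_of_pos (by simp [hfm])]
          simp
        · rw [if_neg hii, List.filter_cons_of_neg (by simp [hfm]; omega)]

-- one round of A (one search term, a full pass over l) is: dedup-append the bucket of
-- that term's index, provided everything matching an earlier term is already in acc
theorem roundA_eq (dict_key : String) (pre rest : List String) (ui : String)
    (l : List (List (String × String))) (acc : List (List (String × String)))
    (hinv : ∀ b ∈ l, ∀ j, fmatch dict_key (pre ++ ui :: rest) b = some j → j < pre.length →
      memD acc b = true) :
    l.foldl (fun breed_list breed =>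
        match pyDictGet breed dict_key with
        | none => breed_list
        | some v =>
          if (PySem.Str.find v ui != -1) &&
             !(breed_list.any (fun b => pyDictEq b breed)) then
            breed_list ++ [breed]
          else breed_list) acc
      = dedupFrom acc (l.filter (fun b => fmatch dict_key (pre ++ ui :: rest) b == some pre.length)) := by
  induction l generalizing acc with
  | nil => simp [dedupFrom]
  | cons b l ih =>
    have hinvb := hinv b (List.mem_cons_self ..)
    have hinvl : ∀ b' ∈ l, ∀ j, fmatch dict_key (pre ++ ui :: rest) b' = some j →
        j < pre.length → memD acc b' = true :=
      fun b' hb' => hinv b' (List.mem_cons_of_mem _ hb')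
    simp only [List.foldl_cons]
    cases hk : pyDictGet b dict_key with
    | none =>
      have hfm : fmatch dict_key (pre ++ ui :: rest) b = none := by simp [fmatch, hk]
      simp only [hk]
      rw [List.filter_cons_of_neg (by simp [hfm])]
      exact ih acc hinvl
    | some v =>
      have hfm : fmatch dict_key (pre ++ ui :: rest) b = firstIdx v (pre ++ ui :: rest) := by
        simp [fmatch, hk]
      simp only [hk]
      cases hf : (PySem.Str.find v ui != -1) with
      | false =>
        rw [if_neg (by simp)]
        rw [List.filter_cons_of_neg (by
          simp only [hfm, beq_iff_eq]
          intro hcon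
          have := firstIdx_self v pre rest ui hcon
          rw [hf] at this
          exact absurd this (by simp))]
        exact ih acc hinvl
      | true =>
        obtain ⟨j, hj, hjle⟩ := firstIdx_le v pre rest ui hf
        rcases Nat.lt_or_ge j pre.length with hlt | hge
        · have hmem : memD acc b = true := hinvb j (by rw [hfm]; exact hj) hlt
          have hmem' : (acc.any fun x => pyDictEq x b) = true := hmem
          rw [if_neg (by simp [hmem'])]
          rw [List.filter_cons_of_neg (by simp [hfm, hj]; omega)]
          exact ih acc hinvl
        · have hjeq : j = pre.length := le_antisymm hjle hge
          subst hjeq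
          rw [List.filter_cons_of_pos (by simp [hfm, hj])]
          have hd : dedupFrom acc (b :: l.filter
              (fun b => fmatch dict_key (pre ++ ui :: rest) b == some pre.length))
              = dedupFrom (dstep acc b) (l.filter
              (fun b => fmatch dict_key (pre ++ ui :: rest) b == some pre.length)) := rfl
          rw [hd]
          have hstep : (if (true && !(acc.any fun x => pyDictEq x b)) = true
              then acc ++ [b] else acc) = dstep acc b := by
            cases hm : (acc.any fun x => pyDictEq x b) <;> simp [dstep, hm]
          rw [hstep]
          exact ih (dstep acc b)
            (fun b' hb' j' hj' hlt' => memD_dstep acc b b' (hinvl b' hb' j' hj' hlt'))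

theorem outer_eq (dict_key : String) (data : List (List (String × String)))
    (pend pre : List String) (acc : List (List (String × String)))
    (hinv : ∀ b ∈ data, ∀ j, fmatch dict_key (pre ++ pend) b = some j → j < pre.length →
      memD acc b = true) :
    pend.foldl (fun breed_list user_input =>
        data.foldl (fun breed_list breed =>
          match pyDictGet breed dict_key with
          | none => breed_list
          | some v =>
            if (PySem.Str.find v user_input != -1) &&
               !(breed_list.any (fun b => pyDictEq b breed)) then
              breed_list ++ [breed]
            else breed_list) breed_list) acc
      = ((List.range' pre.length pend.length).map
          (fun i => data.filter (fun b => fmatch dict_key (pre ++ pend) b == some i))).foldl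
          dedupFrom acc := by
  induction pend generalizing pre acc with
  | nil => rfl
  | cons ui pend ih =>
    simp only [List.foldl_cons, List.length_cons]
    rw [List.range'_succ]
    simp only [List.map_cons, List.foldl_cons]
    rw [roundA_eq dict_key pre pend ui data acc hinv]
    have hre : pre ++ ui :: pend = (pre ++ [ui]) ++ pend := by simp
    have hlen : (pre ++ [ui]).length = pre.length + 1 := by simp
    have := ih (pre ++ [ui]) (dedupFrom acc (data.filter
      (fun b => fmatch dict_key (pre ++ ui :: pend) b == some pre.length)))
      (by
        rw [← hre, hlen]
        intro b hb j hj hlt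
        rcases Nat.lt_or_ge j pre.length with h | h
        · exact memD_dedupFrom _ _ _ (hinv b hb j hj h)
        · have hjeq : j = pre.length := by omega
          subst hjeq
          exact memD_dedupFrom_of_mem _ _ _ (List.mem_filter.mpr ⟨hb, by simp [hj]⟩))
    rw [← hre, hlen] at this
    exact this

-- ===== VERDICT (by name: the statement is the Claim_ definition above) =====
theorem create_breed_list_spec : Claim_equal_create_breed_list := by
  intro data dict_key uil _
  unfold Spec_create_breed_list create_breed_list create_breed_list_alt
  by_cases hany : uil.contains "any"
  · rw [if_pos hany, if_pos hany]
  · rw [if_neg hany, if_neg hany]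
    have hinit : uil.map (fun _ => ([] : List (List (String × String))))
        = (List.range uil.length).map (fun _ => ([] : List (List (String × String)))) := by
      simp
    rw [hinit, buckets_eq dict_key uil data (fun _ => [])]
    rw [outer_eq dict_key data uil [] []
      (fun b hb j hj hlt => absurd hlt (by simp))]
    simp only [List.nil_append, List.length_nil, List.range_eq_range']
    rfl
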